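-- pv_equiv track=rewrite | github.com/YuxianMeng/CorefQA-pytorch | data_preprocess/build_data_to_tfrecord.py | flatten_clusters
-- ===== SOURCE A (Python) =====
-- from typing import List, Tuple
--
-- def flatten_clusters(clusters: List[List[Tuple[int, int]]]) -> Tuple[List[int], List[int], List[int]]:
--     """
--     flattern cluster information
--     :param clusters:
--     :return:
--     """
--     span_starts = []
--     span_ends = []
--     cluster_ids = []
--     for cluster_id, cluster in enumerate(clusters):
--         for start, end in cluster:
--             span_starts.append(start)
--             span_ends.append(end)
--             cluster_ids.append(cluster_id + 1)
--     return span_starts, span_ends, cluster_ids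
-- ===== SOURCE B (Python) =====
-- from typing import List, Tuple
--
-- def flatten_clusters(clusters: List[List[Tuple[int, int]]]) -> Tuple[List[int], List[int], List[int]]:
--     flat = [(start, end, cid + 1) for cid, cluster in enumerate(clusters) for (start, end) in cluster]
--     if not flat:
--         return [], [], []
--     cols = list(zip(*flat))
--     return list(cols[0]), list(cols[1]), list(cols[2])
-- ===== Notes on version B (the rewrite author's own statement) =====
-- stated objective: alternative
-- what changed: B builds a single flat list of (start, end, id) triples in one comprehension and then transposes it with zip(*flat), instead of appending to three parallel accumulator lists inside nested loops.
import Mathlib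
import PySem

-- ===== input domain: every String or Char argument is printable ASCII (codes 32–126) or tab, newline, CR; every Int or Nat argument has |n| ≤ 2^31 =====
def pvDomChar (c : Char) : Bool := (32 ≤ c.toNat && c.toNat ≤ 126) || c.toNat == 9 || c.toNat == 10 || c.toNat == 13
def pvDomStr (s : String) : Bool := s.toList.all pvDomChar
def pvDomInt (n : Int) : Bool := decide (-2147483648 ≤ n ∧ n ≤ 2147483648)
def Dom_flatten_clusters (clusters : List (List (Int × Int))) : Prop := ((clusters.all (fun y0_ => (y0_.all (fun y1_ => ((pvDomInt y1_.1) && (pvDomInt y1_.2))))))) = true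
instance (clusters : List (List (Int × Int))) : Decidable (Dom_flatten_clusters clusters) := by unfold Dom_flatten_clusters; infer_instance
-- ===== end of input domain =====

-- B builds one flat list of (start, end, id) triples and transposes it, instead of
-- appending to three parallel lists inline (objective: alternative decomposition).


-- ===== PORT A =====
-- outer loop `for cluster_id, cluster in enumerate(clusters)` as recursion carrying the index,
-- inner loop as a foldl appending to the three accumulator lists, exactly as A does
def flattenA (clusters : List (List (Int × Int))) (cluster_id : Int)
    (span_starts span_ends cluster_ids : List Int) : List Int × List Int × List Int :=
  match clusters with
  | [] => (span_starts, span_ends, cluster_ids)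
  | cluster :: rest =>
      let acc := cluster.foldl
        (fun (acc : List Int × List Int × List Int) p =>
          (acc.1 ++ [p.1], acc.2.1 ++ [p.2], acc.2.2 ++ [cluster_id + 1]))
        (span_starts, span_ends, cluster_ids)
      flattenA rest (cluster_id + 1) acc.1 acc.2.1 acc.2.2

def flatten_clusters (clusters : List (List (Int × Int))) : List Int × List Int × List Int :=
  flattenA clusters 0 [] [] []

-- ===== PORT B =====
-- build the flat list of triples (the comprehension), then transpose (zip(*flat)) guarded on empty
def flatten_clusters_alt (clusters : List (List (Int × Int))) : List Int × List Int × List Int :=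
  let flat := (clusters.zipIdx).flatMap
    (fun ci => ci.1.map (fun p => (p.1, p.2, (ci.2 : Int) + 1)))
  if flat = [] then ([], [], [])
  else (flat.map (fun t => t.1), flat.map (fun t => t.2.1), flat.map (fun t => t.2.2))

-- ===== PRECONDITION & SPEC =====
def Spec_flatten_clusters (clusters : List (List (Int × Int))) (out : List Int × List Int × List Int) : Prop := out = flatten_clusters_alt clusters
instance (clusters : List (List (Int × Int))) (out : List Int × List Int × List Int) : Decidable (Spec_flatten_clusters clusters out) := by unfold Spec_flatten_clusters; infer_instance

-- ===== CLAIM (what is proved, stated in full; the proofs are below) =====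
def Claim_equal_flatten_clusters : Prop := ∀ (clusters : List (List (Int × Int))), Dom_flatten_clusters clusters → Spec_flatten_clusters clusters (flatten_clusters clusters)

-- ===== LEMMAS AND PROOFS =====

-- the flat list of triples produced from `clusters` with first id `cid + 1`
def flatSpec (clusters : List (List (Int × Int))) (cid : Int) : List (Int × Int × Int) :=
  match clusters with
  | [] => []
  | cluster :: rest => cluster.map (fun p => (p.1, p.2, cid + 1)) ++ flatSpec rest (cid + 1)

theorem innerFold (cluster : List (Int × Int)) (cid : Int) (ss es ids : List Int) :
    cluster.foldl
      (fun (acc : List Int × List Int × List Int) p =>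
        (acc.1 ++ [p.1], acc.2.1 ++ [p.2], acc.2.2 ++ [cid + 1]))
      (ss, es, ids)
    = (ss ++ cluster.map (fun p => p.1), es ++ cluster.map (fun p => p.2),
       ids ++ cluster.map (fun _ => cid + 1)) := by
  induction cluster generalizing ss es ids with
  | nil => simp
  | cons p rest ih => simp [List.foldl, ih]

theorem flattenA_eq (clusters : List (List (Int × Int))) (cid : Int) (ss es ids : List Int) :
    flattenA clusters cid ss es ids
    = (ss ++ (flatSpec clusters cid).map (fun t => t.1),
       es ++ (flatSpec clusters cid).map (fun t => t.2.1),
       ids ++ (flatSpec clusters cid).map (fun t => t.2.2)) := by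
  induction clusters generalizing cid ss es ids with
  | nil => simp [flattenA, flatSpec]
  | cons cluster rest ih =>
      simp only [flattenA, innerFold, ih, flatSpec, List.map_append, List.append_assoc]
      simp only [List.map_map, Function.comp_def]

theorem flatSpec_zipIdx (clusters : List (List (Int × Int))) (k : Nat) :
    (clusters.zipIdx k).flatMap (fun ci => ci.1.map (fun p => (p.1, p.2, (ci.2 : Int) + 1)))
    = flatSpec clusters (k : Int) := by
  induction clusters generalizing k with
  | nil => simp [flatSpec]
  | cons cluster rest ih =>
      simp only [List.zipIdx_cons, List.flatMap_cons, flatSpec]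
      rw [ih (k + 1)]
      push_cast
      ring_nf

-- ===== VERDICT (by name: the statement is the Claim_ definition above) =====
theorem flatten_clusters_spec : Claim_equal_flatten_clusters := by
  intro clusters _
  unfold Spec_flatten_clusters flatten_clusters flatten_clusters_alt
  rw [flattenA_eq]
  have h : (clusters.zipIdx).flatMap (fun ci => ci.1.map (fun p => (p.1, p.2, (ci.2 : Int) + 1)))
      = flatSpec clusters 0 := by
    simpa using flatSpec_zipIdx clusters 0
  simp only [h]
  by_cases hnil : flatSpec clusters 0 = []
  · simp [hnil]
  · simp [hnil]
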